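-- pv_equiv track=rewrite | github.com/Colfeo/Finance_stat | Old Code Debile/GPT/live_strat3_tester.py | compare_N_previous_Values_to_Treshold
-- ===== SOURCE A (Python) =====
-- def compare_N_previous_Values_to_Treshold(length, source, type, threshold):
--     if(len(source)<(length + 1)):
--         return False
--     for j in range(length):
--         if(type == "Above"):
--             if(source[-1*(2+j)] <= threshold):
--                 return False
--         if(type == "Under"):
--             if(source[-1*(2+j)] >= threshold):
--                 return False
--     return True
-- ===== SOURCE B (Python) =====
-- def compare_N_previous_Values_to_Treshold(length, source, type, threshold):
--     if len(source) < length + 1: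
--         return False
--     if length <= 0 or type not in ("Above", "Under"):
--         return True
--     window = source[-(length + 1):-1]
--     if type == "Above":
--         return min(window) > threshold
--     return max(window) < threshold
-- ===== Notes on version B (the rewrite author's own statement) =====
-- stated objective: simpler
-- what changed: Replaces the per-index early-exit loop over negative indices with one slice of the checked window and a single min/max extremum comparison per branch.
import Mathlib
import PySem

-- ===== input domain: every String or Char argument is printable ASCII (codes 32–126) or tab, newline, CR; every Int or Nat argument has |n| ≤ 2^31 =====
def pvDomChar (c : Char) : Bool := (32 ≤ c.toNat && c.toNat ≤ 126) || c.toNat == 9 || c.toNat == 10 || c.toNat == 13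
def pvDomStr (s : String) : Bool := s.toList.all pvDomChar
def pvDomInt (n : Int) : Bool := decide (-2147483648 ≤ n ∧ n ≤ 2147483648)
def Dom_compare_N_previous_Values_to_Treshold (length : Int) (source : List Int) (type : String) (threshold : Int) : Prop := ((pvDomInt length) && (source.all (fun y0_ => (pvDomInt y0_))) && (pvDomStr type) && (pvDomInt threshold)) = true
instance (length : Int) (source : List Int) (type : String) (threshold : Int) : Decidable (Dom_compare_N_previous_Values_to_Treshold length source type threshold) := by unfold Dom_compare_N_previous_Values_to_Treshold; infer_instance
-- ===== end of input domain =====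

-- B replaces A's per-index early-exit loop by one slice of the checked window and a single
-- min/max extremum comparison per branch (objective: simpler).

-- ===== PORT A =====
-- A's loop 'for j in range(length): …' with its two early 'return False' exits;
-- pyGetD is exact here: the length guard puts every index -1*(2+j) in range.
def pvALoop (source : List Int) (type : String) (threshold : Int) : List Int → Bool
  | [] => true
  | j :: rest =>
    if type == "Above" && decide (PySem.List.pyGetD source (-1*(2+j)) 0 ≤ threshold) then false
    else if type == "Under" && decide (threshold ≤ PySem.List.pyGetD source (-1*(2+j)) 0) then false
    else pvALoop source type threshold rest

def compare_N_previous_Values_to_Treshold (length : Int) (source : List Int) (type : String) (threshold : Int) : Bool :=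
  if (source.length : Int) < length + 1 then false
  else pvALoop source type threshold (PySem.List.pyRange 0 length 1)

-- ===== PORT B =====
-- min/max never see [] here (the guards make the window nonempty), so the none arm is unreachable.
def compare_N_previous_Values_to_Treshold_alt (length : Int) (source : List Int) (type : String) (threshold : Int) : Bool :=
  if (source.length : Int) < length + 1 then false
  else if length ≤ 0 || (type != "Above" && type != "Under") then true
  else if type == "Above" then
    match PySem.List.min? (PySem.List.slice source (some (-(length+1))) (some (-1))) (fun y => y) with
    | some m => decide (threshold < m)
    | none => true
  else
    match PySem.List.max? (PySem.List.slice source (some (-(length+1))) (some (-1))) (fun y => y) with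
    | some m => decide (m < threshold)
    | none => true

-- ===== PRECONDITION & SPEC =====
def Spec_compare_N_previous_Values_to_Treshold (length : Int) (source : List Int) (type : String) (threshold : Int) (out : Bool) : Prop := out = compare_N_previous_Values_to_Treshold_alt length source type threshold
instance (length : Int) (source : List Int) (type : String) (threshold : Int) (out : Bool) : Decidable (Spec_compare_N_previous_Values_to_Treshold length source type threshold out) := by unfold Spec_compare_N_previous_Values_to_Treshold; infer_instance

-- ===== CLAIM (what is proved, stated in full; the proofs are below) =====
def Claim_equal_compare_N_previous_Values_to_Treshold : Prop := ∀ (length : Int) (source : List Int) (type : String) (threshold : Int), Dom_compare_N_previous_Values_to_Treshold length source type threshold → Spec_compare_N_previous_Values_to_Treshold length source type threshold (compare_N_previous_Values_to_Treshold length source type threshold)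

-- ===== LEMMAS AND PROOFS =====

-- the per-index check of A's loop body, named so the loop lemma stays readable
def pvOK (source : List Int) (type : String) (threshold : Int) (j : Int) : Bool :=
  !((type == "Above" && decide (PySem.List.pyGetD source (-1*(2+j)) 0 ≤ threshold))
    || (type == "Under" && decide (threshold ≤ PySem.List.pyGetD source (-1*(2+j)) 0)))

theorem pvALoop_eq_all (source : List Int) (type : String) (threshold : Int) (js : List Int) :
    pvALoop source type threshold js = js.all (pvOK source type threshold) := by
  induction js with
  | nil => rfl
  | cons j rest ih =>
    simp only [pvALoop, List.all_cons, ih]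
    cases h1 : (type == "Above" && decide (PySem.List.pyGetD source (-1*(2+j)) 0 ≤ threshold)) with
    | true => rw [if_pos rfl]; simp only [pvOK, h1, Bool.true_or, Bool.not_true, Bool.false_and]
    | false =>
      rw [if_neg (by simp)]
      cases h2 : (type == "Under" && decide (threshold ≤ PySem.List.pyGetD source (-1*(2+j)) 0)) with
      | true => rw [if_pos rfl]; simp only [pvOK, h1, h2, Bool.false_or, Bool.not_true, Bool.false_and]
      | false => rw [if_neg (by simp)]; simp only [pvOK, h1, h2, Bool.false_or, Bool.not_false, Bool.true_and]

-- the slice source[-(length+1):-1] as a drop/take window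
theorem pvWindow_eq (xs : List Int) (a : Int) (h1 : 1 ≤ a) (h2 : a + 1 ≤ (xs.length : Int)) :
    PySem.List.slice xs (some (-(a+1))) (some (-1)) = (xs.drop (xs.length - (a+1).toNat)).take a.toNat := by
  have hne : xs ≠ [] := by rintro rfl; simp at h2; omega
  simp [PySem.List.slice, PySem.List.clampIdx, hne,
    show (-1:Int) < a from by omega,
    show ¬((xs.length:Int) + (-1 + -a) < 0) from by omega]
  rw [show ((xs.length:Int) + (-1 + -a)).toNat = xs.length - (a+1).toNat from by omega,
      show ((xs.length:Int) + -1).toNat - (xs.length - (a+1).toNat) = a.toNat from by omega]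

-- the values A reads at j = 0 … length-1 are the window's elements, back to front
theorem pvMap_eq (source : List Int) (length : Int)
    (h1 : 1 ≤ length) (h2 : length + 1 ≤ (source.length : Int)) :
    (PySem.List.pyRange 0 length 1).map (fun j => PySem.List.pyGetD source (-1*(2+j)) 0)
      = ((source.drop (source.length - (length+1).toNat)).take length.toNat).reverse := by
  apply List.ext_getElem
  · simp [PySem.List.length_pyRange_one]; omega
  · intro i hi1 hi2
    simp only [List.length_map, PySem.List.length_pyRange_one] at hi1
    simp only [List.length_reverse] at hi2
    have hlen : ((source.drop (source.length - (length+1).toNat)).take length.toNat).length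
        = length.toNat := by simp; omega
    simp only [List.getElem_map, PySem.List.getElem_pyRange_one, List.getElem_reverse,
      List.getElem_take, List.getElem_drop]
    rw [show (-1*(2+((0:Int) + (i:Int)))) = -(((2+i : Nat) : Int)) from by push_cast; ring]
    rw [PySem.List.pyGetD_neg_natCast _ _ _ (by omega) (by omega)]
    exact getElem_congr rfl (by omega) (by omega)

-- min?/max? characterisations on a nonempty window
theorem pvMin_gt (w : List Int) (t : Int) (hne : w ≠ []) :
    (match PySem.List.min? w (fun y => y) with
      | some m => decide (t < m)
      | none => true) = true ↔ ∀ x ∈ w, t < x := by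
  cases h : PySem.List.min? w (fun y => y) with
  | none => exact absurd ((PySem.List.min?_eq_none_iff _ _).mp h) hne
  | some m =>
    simp only [decide_eq_true_eq]
    constructor
    · intro ht x hx; exact lt_of_lt_of_le ht (PySem.List.min?_isMin h x hx)
    · intro hall; exact hall m (PySem.List.min?_mem h)

theorem pvMax_lt (w : List Int) (t : Int) (hne : w ≠ []) :
    (match PySem.List.max? w (fun y => y) with
      | some m => decide (m < t)
      | none => true) = true ↔ ∀ x ∈ w, x < t := by
  cases h : PySem.List.max? w (fun y => y) with
  | none => exact absurd ((PySem.List.max?_eq_none_iff _ _).mp h) hne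
  | some m =>
    simp only [decide_eq_true_eq]
    constructor
    · intro ht x hx; exact lt_of_le_of_lt (PySem.List.max?_isMax h x hx) ht
    · intro hall; exact hall m (PySem.List.max?_mem h)

-- ===== VERDICT (by name: the statement is the Claim_ definition above) =====
theorem compare_N_previous_Values_to_Treshold_spec : Claim_equal_compare_N_previous_Values_to_Treshold := by
  intro length source type threshold _
  unfold Spec_compare_N_previous_Values_to_Treshold
  unfold compare_N_previous_Values_to_Treshold compare_N_previous_Values_to_Treshold_alt
  by_cases hg : (source.length : Int) < length + 1
  · rw [if_pos hg, if_pos hg]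
  · rw [if_neg hg, if_neg hg]
    have hn : length + 1 ≤ (source.length : Int) := by omega
    by_cases hl : length ≤ 0
    · rw [PySem.List.pyRange_one_eq_nil (by omega), if_pos (by simp [hl])]
      rfl
    · have h1 : 1 ≤ length := by omega
      rw [pvALoop_eq_all]
      have hwlen : ((source.drop (source.length - (length+1).toNat)).take length.toNat).length
          = length.toNat := by simp; omega
      have hwne : (source.drop (source.length - (length+1).toNat)).take length.toNat ≠ [] := by
        intro h; rw [h] at hwlen; simp at hwlen; omega
      by_cases hA : type = "Above"
      · subst hA
        rw [if_neg (by simp [hl]), if_pos (by simp), pvWindow_eq source length h1 hn,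
          Bool.eq_iff_iff, List.all_eq_true, pvMin_gt _ _ hwne]
        constructor
        · intro hall x hx
          rw [← List.mem_reverse, ← pvMap_eq source length h1 hn] at hx
          obtain ⟨j, hj, rfl⟩ := List.mem_map.mp hx
          have := hall j hj
          simpa [pvOK, not_le] using this
        · intro hmin j hj
          have hx : PySem.List.pyGetD source (-1*(2+j)) 0
              ∈ ((source.drop (source.length - (length+1).toNat)).take length.toNat).reverse := by
            rw [← pvMap_eq source length h1 hn]
            exact List.mem_map_of_mem hj
          rw [List.mem_reverse] at hx
          simpa [pvOK, not_le] using hmin _ hx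
      · by_cases hU : type = "Under"
        · subst hU
          rw [if_neg (by simp [hl]), if_neg (by simp), pvWindow_eq source length h1 hn,
            Bool.eq_iff_iff, List.all_eq_true, pvMax_lt _ _ hwne]
          constructor
          · intro hall x hx
            rw [← List.mem_reverse, ← pvMap_eq source length h1 hn] at hx
            obtain ⟨j, hj, rfl⟩ := List.mem_map.mp hx
            have := hall j hj
            simpa [pvOK, not_le] using this
          · intro hmax j hj
            have hx : PySem.List.pyGetD source (-1*(2+j)) 0
                ∈ ((source.drop (source.length - (length+1).toNat)).take length.toNat).reverse := by
              rw [← pvMap_eq source length h1 hn]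
              exact List.mem_map_of_mem hj
            rw [List.mem_reverse] at hx
            simpa [pvOK, not_le] using hmax _ hx
        · rw [if_pos (by simp [hA, hU])]
          simp [List.all_eq_true, pvOK, hA, hU]
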